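-- pv_equiv track=rewrite | github.com/alekmus/ERBot | boersebot/table_parser.py | fetch_column_idx
-- ===== SOURCE A (Python) =====
-- from collections import defaultdict
--
-- def fetch_column_idx(row_dict):
--     """
--     Helper function for rebuild_table that recreates the column indices based on indices for values.
--     Input can be created by lines_to_index_rows function.
--     :param row_dict: A dictionary of start and end indices of table values.
--     :return: A list of indices that form columns in a table.
--     """
--     start_idx = defaultdict(list)
--     end_idx = defaultdict(list)
--
--     for key, values in row_dict.items():
--         for i, value in enumerate(values):
--             start_idx[i].append(value[0])
--             end_idx[i].append(value[1])
--
--     column_idx = []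
--
--     # Iterate over list of keys instead of dictionary for keeping order. Both idx dictionaries can be assumed to have
--     # the same number of indices.
--     for i in sorted(start_idx.keys()):
--         column_idx.append((min(start_idx[i]), min(end_idx[i])))
--
--     return column_idx
-- ===== SOURCE B (Python) =====
-- def fetch_column_idx(row_dict):
--     """Column-major rebuild: index directly into each row's value list per column,
--     no grouping dicts, no enumerate, no key sort."""
--     rows = list(row_dict.values())
--     width = max((len(r) for r in rows), default=0)
--     column_idx = []
--     for i in range(width):
--         starts = [r[i][0] for r in rows if i < len(r)]
--         ends = [r[i][1] for r in rows if i < len(r)]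
--         column_idx.append((min(starts), min(ends)))
--     return column_idx
-- ===== Notes on version B (the rewrite author's own statement) =====
-- stated objective: alternative
-- what changed: Replaces A's row-major grouping into two defaultdict-of-lists plus a sorted-keys min pass by a column-major rebuild: compute the table width once, then for each column index i index directly into every long-enough row and take the minima; no dicts, no enumerate, no sort.
import Mathlib
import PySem

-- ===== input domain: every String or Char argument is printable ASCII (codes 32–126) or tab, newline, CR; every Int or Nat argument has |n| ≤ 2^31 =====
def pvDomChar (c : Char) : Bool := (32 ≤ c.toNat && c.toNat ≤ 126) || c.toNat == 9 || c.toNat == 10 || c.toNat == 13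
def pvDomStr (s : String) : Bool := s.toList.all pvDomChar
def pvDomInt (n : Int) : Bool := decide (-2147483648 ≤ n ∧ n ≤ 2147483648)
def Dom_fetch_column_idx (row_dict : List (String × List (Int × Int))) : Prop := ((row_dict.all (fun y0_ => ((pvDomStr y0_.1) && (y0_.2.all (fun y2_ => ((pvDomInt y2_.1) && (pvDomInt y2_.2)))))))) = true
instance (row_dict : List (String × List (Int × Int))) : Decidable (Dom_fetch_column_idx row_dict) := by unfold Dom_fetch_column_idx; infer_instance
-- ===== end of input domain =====

-- B rebuilds the columns column-major (width once, then direct indexing into every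
-- long-enough row per column) instead of A's row-major grouping into two dicts of
-- per-column value lists followed by a sorted-keys min pass (alternative algorithm).

-- ===== PORT A =====
-- literal port of A: defaultdict(list) appends (start_idx[i].append(...) = modify i [] (· ++ [x])),
-- then min over each stored list along the sorted keys; min([]) is unreachable (keys always hold
-- nonempty lists), so the Option default .getD 0 is never used
def fetch_column_idx (row_dict : List (String × List (Int × Int))) : List (Int × Int) :=
  let st :=
    row_dict.foldl
      (fun (st : PySem.Dict Int (List Int) × PySem.Dict Int (List Int)) kv =>
        (PySem.List.enumerate kv.2).foldl
          (fun st iv =>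
            (st.1.modify iv.1 [] (· ++ [iv.2.1]), st.2.modify iv.1 [] (· ++ [iv.2.2])))
          st)
      (PySem.Dict.empty, PySem.Dict.empty)
  (PySem.List.sorted st.1.keys (fun x => x) false).foldl
    (fun acc i =>
      acc ++ [((PySem.List.min? (st.1.getD i []) (fun x => x)).getD 0,
               (PySem.List.min? (st.2.getD i []) (fun x => x)).getD 0)])
    []

-- ===== PORT B =====
-- literal port of Source B: rows = the dict's values, width = max of the lengths (default 0),
-- then for each i in range(width) the two comprehensions ([r[i][0] for r in rows if i < len(r)]
-- = filterMap: the guard keeps r[i] in range, so pyGet? is some there) and their minima;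
-- min of a nonempty comprehension, so the Option default .getD 0 is never used
def fetch_column_idx_alt (row_dict : List (String × List (Int × Int))) : List (Int × Int) :=
  let rows := row_dict.map (·.2)
  let width := PySem.List.maxD (rows.map (fun r => (r.length : Int))) (fun x => x) 0
  (PySem.List.pyRange 0 width 1).foldl
    (fun acc i =>
      let starts := rows.filterMap (fun r =>
        if i < (r.length : Int) then (PySem.List.pyGet? r i).map (·.1) else none)
      let ends := rows.filterMap (fun r =>
        if i < (r.length : Int) then (PySem.List.pyGet? r i).map (·.2) else none)
      acc ++ [((PySem.List.min? starts (fun x => x)).getD 0,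
               (PySem.List.min? ends (fun x => x)).getD 0)])
    []

-- ===== PRECONDITION & SPEC =====
def Spec_fetch_column_idx (row_dict : List (String × List (Int × Int))) (out : List (Int × Int)) : Prop := out = fetch_column_idx_alt row_dict
instance (row_dict : List (String × List (Int × Int))) (out : List (Int × Int)) : Decidable (Spec_fetch_column_idx row_dict out) := by unfold Spec_fetch_column_idx; infer_instance

-- ===== CLAIM =====
def Claim_equal_fetch_column_idx : Prop := ∀ (row_dict : List (String × List (Int × Int))), Dom_fetch_column_idx row_dict → Spec_fetch_column_idx row_dict (fetch_column_idx row_dict)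

-- ===== LEMMAS AND PROOFS =====

-- A's outer fold carries a pair of independently-updated dicts: split it into two folds
theorem pvSplit {σ₁ σ₂ β γ : Type} (g : β → List γ) (m1 : σ₁ → γ → σ₁) (m2 : σ₂ → γ → σ₂)
    (l : List β) (d1 : σ₁) (d2 : σ₂) :
    l.foldl (fun st kv => (g kv).foldl (fun st iv => (m1 st.1 iv, m2 st.2 iv)) st) (d1, d2) =
      (l.foldl (fun d kv => (g kv).foldl m1 d) d1, l.foldl (fun d kv => (g kv).foldl m2 d) d2) := by
  induction l generalizing d1 d2 with
  | nil => rfl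
  | cons x t ih => simp only [List.foldl_cons, PySem.List.foldl_prod_mk, ih]

-- the same, specialised to A's concrete update functions (beta-reduced form; rw-able)
theorem pvSplitA (rd : List (String × List (Int × Int)))
    (d1 d2 : PySem.Dict Int (List Int)) :
    rd.foldl (fun st kv => (PySem.List.enumerate kv.2).foldl
        (fun st iv => (st.1.modify iv.1 [] (· ++ [iv.2.1]), st.2.modify iv.1 [] (· ++ [iv.2.2])))
        st) (d1, d2) =
      (rd.foldl (fun d kv => (PySem.List.enumerate kv.2).foldl
          (fun d iv => d.modify iv.1 [] (· ++ [iv.2.1])) d) d1,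
       rd.foldl (fun d kv => (PySem.List.enumerate kv.2).foldl
          (fun d iv => d.modify iv.1 [] (· ++ [iv.2.2])) d) d2) :=
  pvSplit (fun kv => PySem.List.enumerate kv.2)
    (fun d iv => d.modify iv.1 [] (· ++ [iv.2.1]))
    (fun d iv => d.modify iv.1 [] (· ++ [iv.2.2])) rd d1 d2

-- filtering a step-1 range for one value
theorem pvFilterRange (a b i : Int) :
    (PySem.List.pyRange a b).filter (fun j => j == i) =
      if a ≤ i ∧ i < b then [i] else [] := by
  by_cases hab : a < b
  · rw [PySem.List.pyRange_one_cons hab]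
    have := pvFilterRange (a + 1) b i
    by_cases hai : a = i
    · subst hai
      simp only [List.filter_cons, beq_self_eq_true, if_true, this]
      rw [if_neg (by omega), if_pos (by omega)]
    · have h2 : (a + 1 ≤ i ∧ i < b) ↔ (a ≤ i ∧ i < b) := by omega
      simp only [List.filter_cons, show (a == i) = false by simpa using hai, this,
        Bool.false_eq_true, if_false]
      exact if_congr h2 rfl rfl
  · rw [PySem.List.pyRange_one_eq_nil (by omega), if_neg (by omega)]
    rfl
termination_by (b - a).toNat
decreasing_by omega

-- one row's contribution to column i, on A's side
theorem pvRowCol {γ : Type} (r : List (Int × Int)) (i : Int) (f : Int × Int → γ) :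
    ((PySem.List.enumerate r).filter (fun iv => iv.1 == i)).map (fun iv => f iv.2) =
      if 0 ≤ i ∧ i < (r.length : Int) then [f (PySem.List.pyGetD r i (0, 0))] else [] := by
  rw [PySem.List.enumerate_eq_map_pyRange r (0, 0), List.filter_map]
  have : ((fun iv : Int × (Int × Int) => iv.1 == i) ∘ fun j => (j, PySem.List.pyGetD r j (0, 0)))
      = fun j => j == i := rfl
  rw [this, pvFilterRange]
  simp only [PySem.List.len]
  split_ifs <;> simp

-- B's comprehension for column i equals A's per-row contributions, flattened
theorem pvColEq {γ : Type} (rows : List (List (Int × Int))) (i : Int) (hi : 0 ≤ i)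
    (f : Int × Int → γ) :
    rows.filterMap (fun r =>
        if i < (r.length : Int) then (PySem.List.pyGet? r i).map f else none) =
      rows.flatMap (fun r =>
        ((PySem.List.enumerate r).filter (fun iv => iv.1 == i)).map (fun iv => f iv.2)) := by
  rw [List.filterMap_eq_flatMap_toList]
  refine List.flatMap_congr (fun r _ => ?_)
  rw [pvRowCol]
  by_cases h : i < (r.length : Int)
  · have hn : i.toNat < r.length := by omega
    have hopt : PySem.List.pyGet? r i = r[i.toNat]? := by
      rw [show i = ((i.toNat : Nat) : Int) by omega, PySem.List.pyGet?_natCast,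
        Int.toNat_natCast]
    rw [if_pos h, if_pos ⟨hi, h⟩, hopt, List.getElem?_eq_getElem hn,
      PySem.List.pyGetD_eq_getElem r (0, 0) hi h]
    rfl
  · rw [if_neg h, if_neg (by omega)]
    rfl

-- ===== VERDICT =====
theorem fetch_column_idx_spec : Claim_equal_fetch_column_idx := by
  intro rd _
  unfold Spec_fetch_column_idx fetch_column_idx fetch_column_idx_alt
  dsimp only
  rw [pvSplitA rd PySem.Dict.empty PySem.Dict.empty]
  dsimp only
  set bigL := rd.flatMap (fun kv => PySem.List.enumerate kv.2) with hbigL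
  have hfold1 : rd.foldl (fun d kv => (PySem.List.enumerate kv.2).foldl
      (fun d iv => d.modify iv.1 [] (· ++ [iv.2.1])) d) PySem.Dict.empty =
      (bigL.map (fun iv => (iv.1, iv.2.1))).foldl
        (fun d p => d.modify p.1 [] (· ++ [p.2])) PySem.Dict.empty := by
    rw [List.foldl_map, hbigL, List.foldl_flatMap]
  have hfold2 : rd.foldl (fun d kv => (PySem.List.enumerate kv.2).foldl
      (fun d iv => d.modify iv.1 [] (· ++ [iv.2.2])) d) PySem.Dict.empty =
      (bigL.map (fun iv => (iv.1, iv.2.2))).foldl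
        (fun d p => d.modify p.1 [] (· ++ [p.2])) PySem.Dict.empty := by
    rw [List.foldl_map, hbigL, List.foldl_flatMap]
  set rows := rd.map (·.2) with hrows
  set width := PySem.List.maxD (rows.map (fun r => (r.length : Int))) (fun x => x) 0 with hw
  -- the set of keys is exactly [0, width)
  have hmemIdx : ∀ x : Int, x ∈ bigL.map (fun iv => iv.1) ↔ 0 ≤ x ∧ x < width := by
    intro x
    rw [hbigL, List.map_flatMap]
    constructor
    · intro hx
      obtain ⟨kv, hkv, hx⟩ := List.mem_flatMap.mp hx
      rw [PySem.List.map_fst_enumerate, zero_add] at hx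
      have hx := PySem.List.mem_pyRange_one.mp hx
      have hb : (kv.2.length : Int) ≤ width := by
        have hm : (kv.2.length : Int) ∈ rows.map (fun r => (r.length : Int)) := by
          rw [hrows, List.map_map]
          exact List.mem_map.mpr ⟨kv, hkv, rfl⟩
        obtain ⟨y, t, hyt⟩ := List.exists_cons_of_ne_nil (List.ne_nil_of_mem hm)
        rw [hw, hyt, PySem.List.maxD_id_cons]
        rw [hyt] at hm
        rcases List.mem_cons.mp hm with h | h
        · rw [h]; exact (PySem.List.le_foldl_max t y).1
        · exact (PySem.List.le_foldl_max t y).2 _ h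
      exact ⟨hx.1, lt_of_lt_of_le hx.2 hb⟩
    · rintro ⟨hx0, hxw⟩
      have hne : rows.map (fun r => (r.length : Int)) ≠ [] := by
        intro h
        rw [hw, h, PySem.List.maxD_nil] at hxw
        omega
      have hmem := PySem.List.maxD_mem _ (fun x => x) 0 hne
      rw [← hw] at hmem
      obtain ⟨r, hr, hlen⟩ := List.mem_map.mp hmem
      rw [hrows] at hr
      obtain ⟨kv, hkv, rfl⟩ := List.mem_map.mp hr
      refine List.mem_flatMap.mpr ⟨kv, hkv, ?_⟩
      rw [PySem.List.map_fst_enumerate, zero_add]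
      exact PySem.List.mem_pyRange_one.mpr ⟨hx0, by omega⟩
  have hkeys : PySem.List.sorted
      ((bigL.map (fun iv => (iv.1, iv.2.1))).foldl
        (fun d p => d.modify p.1 [] (· ++ [p.2])) PySem.Dict.empty).keys
      (fun x => x) false = PySem.List.pyRange 0 width := by
    rw [show (fun (d : PySem.Dict Int (List Int)) (p : Int × Int) =>
          d.modify p.1 [] (· ++ [p.2])) =
        (fun d p => d.modify ((fun q : Int × Int => q.1) p) [] ((fun _ q => (· ++ [q.2])) d p))
        from rfl,
      PySem.Dict.keys_foldl_modify_key]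
    refine PySem.List.sorted_eq_of_perm_of_pairwise_lt _ _ _ ?_ ?_
    · refine (List.perm_ext_iff_of_nodup (PySem.List.nodup_pyRange_one 0 width) ?_).mpr ?_
      · exact PySem.Set.nodup_update _ _ (by simp [PySem.Dict.empty, PySem.Dict.keys])
      · intro x
        rw [PySem.List.mem_pyRange_one]
        rw [PySem.Set.mem_update]
        have : (PySem.Dict.empty : PySem.Dict Int (List Int)).keys = [] := rfl
        rw [this]
        simp only [List.not_mem_nil, false_or, List.map_map]
        rw [show ((fun q : Int × Int => q.1) ∘ fun iv : Int × (Int × Int) => (iv.1, iv.2.1))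
            = fun iv : Int × (Int × Int) => iv.1 from rfl]
        exact (hmemIdx x).symm
    · rw [PySem.List.pyRange_one]
      exact (List.pairwise_lt_range.map _ (fun a b h => by omega))
  rw [hfold1, hfold2, hkeys, PySem.List.foldl_append_singleton_eq_map,
    PySem.List.foldl_append_singleton_eq_map, List.nil_append, List.nil_append]
  refine List.map_congr_left (fun i hi => ?_)
  have hi := PySem.List.mem_pyRange_one.mp hi
  have hgetD : ∀ (sel : Int × Int → Int),
      ((bigL.map (fun iv => (iv.1, sel iv.2))).foldl
        (fun d p => d.modify p.1 [] (· ++ [p.2])) PySem.Dict.empty).getD i [] =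
      rows.filterMap (fun r =>
        if i < (r.length : Int) then (PySem.List.pyGet? r i).map sel else none) := by
    intro sel
    rw [PySem.Dict.getD_foldl_modify_append]
    have hemp : (PySem.Dict.empty : PySem.Dict Int (List Int)).getD i [] = [] := rfl
    rw [hemp, List.nil_append, List.filter_map]
    rw [show ((fun p : Int × Int => p.1 == i) ∘ fun iv : Int × (Int × Int) => (iv.1, sel iv.2))
        = fun iv : Int × (Int × Int) => iv.1 == i from rfl]
    rw [List.map_map,
      show ((fun p : Int × Int => p.2) ∘ fun iv : Int × (Int × Int) => (iv.1, sel iv.2))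
        = fun iv : Int × (Int × Int) => sel iv.2 from rfl]
    rw [pvColEq rows i hi.1 sel, hbigL, List.filter_flatMap, List.map_flatMap, hrows]
    rw [List.flatMap_map]
  rw [hgetD (·.1), hgetD (·.2)]
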